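-- pv_equiv track=rewrite | github.com/Niamass/-Interval-analysis | Lab_1/Lab_1.py | mode_mu
-- ===== SOURCE A (Python) =====
-- def mode_mu(st, fin):
--     N = len(st)
--     intervals_mu = []
--     all_int=st + fin
--     all_int.sort()
--     for i in range(0, 2*N-1):
--         if (all_int[i]!=all_int[i+1]):
--             intervals_mu.append([all_int[i], all_int[i+1]])
--     nums=[]
--     for i in range(len(intervals_mu)):
--         nums.append(0)
--         for j in range(N):
--             if intervals_mu[i][0]>=st[j] and intervals_mu[i][1]<=fin[j]:
--                 nums[i]+=1
--     mode=[]
--     mu = max(nums)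
--     for i in range(len(intervals_mu)):
--         if(nums[i]==mu):
--             mode.append(intervals_mu[i])
--     return nums, intervals_mu, mu, mode
-- ===== SOURCE B (Python) =====
-- def mode_mu(st, fin):
--     N = len(st)
--     pts = sorted(st + fin)[:2 * N]
--     # sweep line: +1 where an interval opens, -1 where it closes; a running
--     # counter then gives each elementary segment's coverage in one pass
--     delta = {}
--     for s, f in zip(st, fin):
--         if s < f:
--             delta[s] = delta.get(s, 0) + 1
--             delta[f] = delta.get(f, 0) - 1
--     intervals_mu = []
--     nums = []
--     cover = 0
--     for a, b in zip(pts, pts[1:]):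
--         cover += delta.pop(a, 0)
--         if a != b:
--             intervals_mu.append([a, b])
--             nums.append(cover)
--     mu = max(nums)
--     mode = [iv for iv, n in zip(intervals_mu, nums) if n == mu]
--     return nums, intervals_mu, mu, mode
-- ===== Notes on version B (the rewrite author's own statement) =====
-- stated objective: faster
-- what changed: B replaces A's per-segment nested rescan of all N intervals by a sweep line: it builds a dict of +1/-1 endpoint events once and obtains every elementary segment's coverage from a running counter in a single pass over the sorted endpoints, so the quadratic inner loop disappears.
import Mathlib
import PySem

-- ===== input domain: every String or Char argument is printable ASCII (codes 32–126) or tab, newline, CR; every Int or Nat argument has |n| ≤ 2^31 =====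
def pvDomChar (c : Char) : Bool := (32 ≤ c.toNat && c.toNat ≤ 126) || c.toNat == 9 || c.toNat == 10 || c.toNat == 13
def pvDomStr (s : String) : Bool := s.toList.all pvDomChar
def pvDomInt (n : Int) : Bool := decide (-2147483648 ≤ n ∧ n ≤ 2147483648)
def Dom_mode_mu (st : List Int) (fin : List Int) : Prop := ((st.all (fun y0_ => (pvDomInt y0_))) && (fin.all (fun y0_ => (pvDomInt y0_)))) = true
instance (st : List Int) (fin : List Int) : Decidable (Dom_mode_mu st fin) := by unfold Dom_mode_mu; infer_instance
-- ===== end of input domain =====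

-- B replaces A's nested per-segment rescan by a sweep line (endpoint-event dict + running
-- coverage counter over the sorted endpoints); objective: faster (asymptotic, measured).

-- ===== PORT A =====
def mode_mu (st : List Int) (fin : List Int) : List Int × List (List Int) × Int × List (List Int) :=
  let N : Int := st.length
  let all_int : List Int := PySem.List.sorted (st ++ fin) (fun x => x) false
  let intervals_mu : List (List Int) :=
    (PySem.List.pyRange 0 (2*N - 1) 1).foldl (fun acc i =>
      if PySem.List.pyGetD all_int i 0 ≠ PySem.List.pyGetD all_int (i+1) 0 then
        acc ++ [[PySem.List.pyGetD all_int i 0, PySem.List.pyGetD all_int (i+1) 0]]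
      else acc) []
  let nums : List Int :=
    (PySem.List.pyRange 0 (intervals_mu.length : Int) 1).foldl (fun ns i =>
      let ns := ns ++ [0]
      (PySem.List.pyRange 0 N 1).foldl (fun ns2 j =>
        if PySem.List.pyGetD (PySem.List.pyGetD intervals_mu i []) 0 0 ≥ PySem.List.pyGetD st j 0 ∧
           PySem.List.pyGetD (PySem.List.pyGetD intervals_mu i []) 1 0 ≤ PySem.List.pyGetD fin j 0 then
          PySem.List.pySetD ns2 i (PySem.List.pyGetD ns2 i 0 + 1)
        else ns2) ns) []
  let mu : Int := (PySem.List.max? nums (fun x => x)).getD 0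
  let mode : List (List Int) :=
    (PySem.List.pyRange 0 (intervals_mu.length : Int) 1).foldl (fun acc i =>
      if PySem.List.pyGetD nums i 0 = mu then acc ++ [PySem.List.pyGetD intervals_mu i []] else acc) []
  (nums, intervals_mu, mu, mode)

-- ===== PORT B =====
-- loop body of B's event-building pass: delta[s] = delta.get(s,0)+1; delta[f] = delta.get(f,0)-1
def pvDStep (d : PySem.Dict Int Int) (sf : Int × Int) : PySem.Dict Int Int :=
  if sf.1 < sf.2 then
    let d1 := d.insert sf.1 (d.getD sf.1 0 + 1)
    d1.insert sf.2 (d1.getD sf.2 0 - 1)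
  else d

-- loop body of B's sweep pass: cover += delta.pop(a, 0); append segment and count if a != b
def pvBStep (ac : PySem.Dict Int Int × List (List Int) × List Int × Int) (p : Int × Int) :
    PySem.Dict Int Int × List (List Int) × List Int × Int :=
  let cover := ac.2.2.2 + ac.1.getD p.1 0
  let d := ac.1.erase p.1
  if p.1 ≠ p.2 then (d, ac.2.1 ++ [[p.1, p.2]], ac.2.2.1 ++ [cover], cover)
  else (d, ac.2.1, ac.2.2.1, cover)

def mode_mu_alt (st : List Int) (fin : List Int) : List Int × List (List Int) × Int × List (List Int) :=
  let N : Int := st.length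
  let pts : List Int := PySem.List.slice (PySem.List.sorted (st ++ fin) (fun x => x) false) none (some (2*N))
  let delta : PySem.Dict Int Int := (st.zip fin).foldl pvDStep PySem.Dict.empty
  let step := (pts.zip (PySem.List.slice pts (some 1) none)).foldl pvBStep (delta, [], [], 0)
  let intervals_mu : List (List Int) := step.2.1
  let nums : List Int := step.2.2.1
  let mu : Int := (PySem.List.max? nums (fun x => x)).getD 0
  let mode : List (List Int) :=
    (intervals_mu.zip nums).foldl (fun acc p => if p.2 = mu then acc ++ [p.1] else acc) []
  (nums, intervals_mu, mu, mode)

-- ===== PRECONDITION & SPEC =====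
-- Pre_ excludes exactly the inputs where Python A raises: len(fin) < len(st) (IndexError on
-- all_int[i]) and inputs whose 2*len(st) smallest endpoints are all equal, e.g. st = [] (then
-- intervals_mu is empty and max([]) raises ValueError).
def Pre_mode_mu (st : List Int) (fin : List Int) : Prop :=
  st.length ≤ fin.length ∧
  ((((PySem.List.sorted (st ++ fin) (fun x => x) false).take (2 * st.length)).any
      (fun x => decide (x ≠ ((PySem.List.sorted (st ++ fin) (fun x => x) false).take (2 * st.length)).headD 0))) = true)
instance (st : List Int) (fin : List Int) : Decidable (Pre_mode_mu st fin) := by unfold Pre_mode_mu; infer_instance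
def pvWitness_mode_mu : List Int × List Int := ([0], [1])
def Spec_mode_mu (st : List Int) (fin : List Int) (out : List Int × List (List Int) × Int × List (List Int)) : Prop := out = mode_mu_alt st fin
instance (st : List Int) (fin : List Int) (out : List Int × List (List Int) × Int × List (List Int)) : Decidable (Spec_mode_mu st fin out) := by unfold Spec_mode_mu; infer_instance

-- ===== CLAIM (what is proved, stated in full; the proofs are below) =====
def Claim_equal_mode_mu : Prop := ∀ (st : List Int) (fin : List Int), Dom_mode_mu st fin → Pre_mode_mu st fin → Spec_mode_mu st fin (mode_mu st fin)

-- ===== LEMMAS AND PROOFS =====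

theorem foldl_pyRange_zero_toNat {γ : Type} (b : Int) (f : γ → Int → γ) (init : γ) :
    (PySem.List.pyRange 0 b 1).foldl f init = (List.range b.toNat).foldl (fun c (k : Nat) => f c (k : Int)) init := by
  rw [PySem.List.pyRange_one]
  simp [List.foldl_map]

theorem foldl_range_two {α β γ : Type} (g : γ → α → β → γ) (d1 : α) (d2 : β) :
    ∀ (n : Nat) (l1 : List α) (l2 : List β) (init : γ), n ≤ l1.length → n ≤ l2.length →
    (List.range n).foldl (fun c k => g c (l1.getD k d1) (l2.getD k d2)) init
      = ((l1.zip l2).take n).foldl (fun c p => g c p.1 p.2) init := by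
  intro n
  induction n with
  | zero => intro l1 l2 init _ _; simp
  | succ n ih =>
    intro l1 l2 init h1 h2
    have hn1 : n < l1.length := by omega
    have hn2 : n < l2.length := by omega
    have hz : n < (l1.zip l2).length := by simp [List.length_zip]; omega
    rw [List.range_succ, List.foldl_append, ih l1 l2 init (by omega) (by omega)]
    rw [List.take_succ]
    rw [List.getElem?_eq_getElem hz, List.foldl_append]
    simp [List.getElem_zip, List.getD_eq_getElem?_getD, List.getElem?_eq_getElem hn1,
      List.getElem?_eq_getElem hn2]

theorem getD_tail {α : Type} (l : List α) (k : Nat) (d : α) :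
    l.tail.getD k d = l.getD (k+1) d := by
  cases l <;> simp [List.getD]

theorem zip_tail_take {α : Type} : ∀ (l : List α) (m : Nat),
    (l.take (m+1)).zip (l.take (m+1)).tail = (l.zip l.tail).take m := by
  intro l
  induction l with
  | nil => intro m; simp
  | cons a t ih =>
    intro m
    cases t with
    | nil => simp
    | cons b r =>
      cases m with
      | zero => simp
      | succ m =>
        have h := ih m
        simp only [List.take_succ_cons, List.tail_cons, List.zip_cons_cons] at h ⊢
        rw [h]

theorem adj_of_pairwise (l : List Int) (hl : l.Pairwise (· ≤ ·)) :
    ∀ a b, (a, b) ∈ l.zip l.tail → a ≤ b ∧ ∀ x ∈ l, x ≤ a ∨ b ≤ x := by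
  induction l with
  | nil => simp
  | cons c t ih =>
    intro a b hab
    cases t with
    | nil => simp at hab
    | cons e t' =>
      rw [List.pairwise_cons] at hl
      simp only [List.tail_cons, List.zip_cons_cons, List.mem_cons] at hab
      rcases hab with h | h
      · obtain ⟨ha, hb⟩ := Prod.mk.injEq .. ▸ h
        subst ha; subst hb
        refine ⟨hl.1 _ (by simp), ?_⟩
        intro x hx
        rcases List.mem_cons.mp hx with rfl | hx
        · exact Or.inl le_rfl
        · rcases List.mem_cons.mp hx with rfl | hx
          · exact Or.inr le_rfl
          · exact Or.inr ((List.pairwise_cons.mp hl.2).1 x hx)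
      · obtain ⟨hab2, hall⟩ := ih hl.2 a b h
        refine ⟨hab2, ?_⟩
        intro x hx
        rcases List.mem_cons.mp hx with rfl | hx
        · exact Or.inl (hl.1 a (List.of_mem_zip h).1)
        · exact hall x hx

-- the shared vocabulary: full sorted endpoint list, its 2N-prefix, elementary segments, counts
def pvAll (st fin : List Int) : List Int := PySem.List.sorted (st ++ fin) (fun x => x) false
def pvPts (st fin : List Int) : List Int := (pvAll st fin).take (2 * st.length)
def pvSegs (st fin : List Int) : List (Int × Int) :=
  ((pvPts st fin).zip (pvPts st fin).tail).filter (fun p => decide (p.1 ≠ p.2))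
def pvIvs (st fin : List Int) : List (List Int) := (pvSegs st fin).map (fun p => [p.1, p.2])
def pvCnt (st fin : List Int) (a : Int) : Int :=
  (st.zip fin).foldl (fun c sf => if sf.1 ≤ a ∧ a < sf.2 then c + 1 else c) 0
def pvNums (st fin : List Int) : List Int := (pvSegs st fin).map (fun p => pvCnt st fin p.1)

theorem pvCnt_eq_sum (st fin : List Int) (a : Int) :
    pvCnt st fin a = ((st.zip fin).map (fun sf => if sf.1 ≤ a ∧ a < sf.2 then (1 : Int) else 0)).sum := by
  unfold pvCnt
  have h : (fun (c : Int) (sf : Int × Int) => if sf.1 ≤ a ∧ a < sf.2 then c + 1 else c)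
      = (fun c sf => c + (if sf.1 ≤ a ∧ a < sf.2 then (1 : Int) else 0)) := by
    funext c sf; split_ifs <;> omega
  rw [h, PySem.List.foldl_add]
  simp

-- ===== A-side: intervals, nums, mode in terms of the shared vocabulary =====

theorem ivA_eq (st fin : List Int) (hN : 1 ≤ st.length) (hlen : st.length ≤ fin.length) :
    (PySem.List.pyRange 0 (2 * (st.length : Int) - 1) 1).foldl (fun acc i =>
      if PySem.List.pyGetD (pvAll st fin) i 0 ≠ PySem.List.pyGetD (pvAll st fin) (i+1) 0 then
        acc ++ [[PySem.List.pyGetD (pvAll st fin) i 0, PySem.List.pyGetD (pvAll st fin) (i+1) 0]]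
      else acc) []
    = pvIvs st fin := by
  have hlenall : (pvAll st fin).length = st.length + fin.length := by
    unfold pvAll
    rw [(PySem.List.sorted_perm (st ++ fin) (fun x : Int => x) false).length_eq]
    simp
  rw [foldl_pyRange_zero_toNat]
  have hfun : (fun (acc : List (List Int)) (k : Nat) =>
      if PySem.List.pyGetD (pvAll st fin) (k : Int) 0 ≠ PySem.List.pyGetD (pvAll st fin) ((k : Int)+1) 0 then
        acc ++ [[PySem.List.pyGetD (pvAll st fin) (k : Int) 0, PySem.List.pyGetD (pvAll st fin) ((k : Int)+1) 0]]
      else acc)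
      = (fun acc k => (fun (a : List (List Int)) (x y : Int) => if x ≠ y then a ++ [[x, y]] else a)
          acc ((pvAll st fin).getD k 0) ((pvAll st fin).tail.getD k 0)) := by
    funext acc k
    have hcast : ((k : Int) + 1) = ((k + 1 : Nat) : Int) := by push_cast; ring
    simp only [hcast, PySem.List.pyGetD_natCast, getD_tail]
  rw [hfun, foldl_range_two (fun (a : List (List Int)) (x y : Int) => if x ≠ y then a ++ [[x, y]] else a)
        0 0 ((2 * (st.length : Int) - 1).toNat) (pvAll st fin) (pvAll st fin).tail []
        (by omega) (by simp [List.length_tail]; omega)]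
  have htn : (2 * (st.length : Int) - 1).toNat = 2 * st.length - 1 := by omega
  have hm1 : 2 * st.length - 1 + 1 = 2 * st.length := by omega
  rw [htn, ← zip_tail_take (pvAll st fin) (2 * st.length - 1), hm1]
  rw [PySem.List.foldl_append_ite (fun p : Int × Int => p.1 ≠ p.2) (fun p => [p.1, p.2])]
  simp [pvIvs, pvSegs, pvPts]

theorem mem_segs_zip_all (st fin : List Int) (p : Int × Int) (hp : p ∈ pvSegs st fin) :
    p ∈ (pvAll st fin).zip (pvAll st fin).tail ∧ p.1 ≠ p.2 := by
  have h := List.mem_filter.mp hp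
  refine ⟨?_, by simpa using h.2⟩
  have hmem := h.1
  by_cases hN : st.length = 0
  · simp [pvPts, hN] at hmem
  · have hm1 : 2 * st.length - 1 + 1 = 2 * st.length := by omega
    have : p ∈ ((pvAll st fin).zip (pvAll st fin).tail).take (2 * st.length - 1) := by
      rw [← zip_tail_take (pvAll st fin) (2 * st.length - 1), hm1]
      exact hmem
    exact List.mem_of_mem_take this

theorem cnt_eq (st fin : List Int) (hlen : st.length ≤ fin.length) (p : Int × Int)
    (hp : p ∈ pvSegs st fin) :
    (PySem.List.pyRange 0 (st.length : Int) 1).foldl (fun x j =>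
      if PySem.List.pyGetD [p.1, p.2] 0 0 ≥ PySem.List.pyGetD st j 0 ∧
         PySem.List.pyGetD [p.1, p.2] 1 0 ≤ PySem.List.pyGetD fin j 0 then x + 1 else x) (0 : Int)
    = pvCnt st fin p.1 := by
  have hpair : (pvAll st fin).Pairwise (· ≤ ·) := by
    simpa [pvAll] using PySem.List.sorted_pairwise (st ++ fin) (fun x : Int => x)
  obtain ⟨hmem, hne⟩ := mem_segs_zip_all st fin p hp
  obtain ⟨hle, hall⟩ := adj_of_pairwise (pvAll st fin) hpair p.1 p.2 (by simpa using hmem)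
  have hab : p.1 < p.2 := lt_of_le_of_ne hle hne
  simp only [PySem.List.pyGetD_ofNat', List.getD_cons_succ, List.getD_cons_zero]
  rw [foldl_pyRange_zero_toNat]
  have hfun : (fun (x : Int) (k : Nat) =>
      if p.1 ≥ PySem.List.pyGetD st (k : Int) 0 ∧ p.2 ≤ PySem.List.pyGetD fin (k : Int) 0 then x + 1 else x)
      = (fun x k => (fun (x : Int) (s f : Int) => if p.1 ≥ s ∧ p.2 ≤ f then x + 1 else x)
          x (st.getD k 0) (fin.getD k 0)) := by
    funext x k
    simp only [PySem.List.pyGetD_natCast]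
  rw [Int.toNat_natCast]
  rw [hfun]
  rw [foldl_range_two (fun (x : Int) (s f : Int) => if p.1 ≥ s ∧ p.2 ≤ f then x + 1 else x)
        0 0 st.length st fin 0 le_rfl hlen]
  rw [List.take_of_length_le (by rw [List.length_zip]; omega)]
  unfold pvCnt
  apply PySem.List.foldl_congr_mem
  intro acc sf hsf
  have hf : sf.2 ∈ pvAll st fin := by
    have h2 : sf.2 ∈ fin := (List.of_mem_zip hsf).2
    exact ((PySem.List.sorted_perm (st ++ fin) (fun x : Int => x) false).mem_iff).mpr
      (List.mem_append.mpr (Or.inr h2))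
  have hiff : (p.1 ≥ sf.1 ∧ p.2 ≤ sf.2) ↔ (sf.1 ≤ p.1 ∧ p.1 < sf.2) := by
    constructor
    · rintro ⟨h1, h2⟩; exact ⟨h1, lt_of_lt_of_le hab h2⟩
    · rintro ⟨h1, h2⟩
      refine ⟨h1, ?_⟩
      rcases hall sf.2 hf with h | h
      · exact absurd h2 (not_lt.mpr h)
      · exact h
  rw [if_congr hiff rfl rfl]

theorem setLast_step (pre : List Int) (c v : Int) :
    PySem.List.pySetD (pre ++ [c]) (pre.length : Int) v = pre ++ [v] := by
  simp [PySem.List.pySetD_natCast]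

theorem getLast_step (pre : List Int) (c : Int) (d : Int) :
    PySem.List.pyGetD (pre ++ [c]) (pre.length : Int) d = c := by
  simp [PySem.List.pyGetD_natCast, List.getD_eq_getElem?_getD]

theorem foldl_setLast {ι : Type} (P : ι → Prop) [DecidablePred P] (l : List ι) :
    ∀ (pre : List Int) (c : Int),
    l.foldl (fun ns j => if P j then PySem.List.pySetD ns (pre.length : Int) (PySem.List.pyGetD ns (pre.length : Int) 0 + 1) else ns) (pre ++ [c])
      = pre ++ [l.foldl (fun x j => if P j then x + 1 else x) c] := by
  induction l with
  | nil => intro pre c; simp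
  | cons j t ih =>
    intro pre c
    simp only [List.foldl_cons]
    by_cases h : P j
    · simp only [if_pos h, getLast_step, setLast_step]
      exact ih pre (c + 1)
    · simp only [if_neg h]
      exact ih pre c

theorem numsA_eq (st fin : List Int) (ivs : List (List Int)) (N : Int) :
    ∀ (m : Nat), m ≤ ivs.length →
    (List.range m).foldl
      (fun ns (k : Nat) => (PySem.List.pyRange 0 N 1).foldl
        (fun ns2 j =>
          if PySem.List.pyGetD (PySem.List.pyGetD ivs (k : Int) []) 0 0 ≥ PySem.List.pyGetD st j 0 ∧
             PySem.List.pyGetD (PySem.List.pyGetD ivs (k : Int) []) 1 0 ≤ PySem.List.pyGetD fin j 0 then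
            PySem.List.pySetD ns2 (k : Int) (PySem.List.pyGetD ns2 (k : Int) 0 + 1)
          else ns2) (ns ++ [(0 : Int)])) []
      = (ivs.take m).map (fun iv => (PySem.List.pyRange 0 N 1).foldl
          (fun x j =>
            if PySem.List.pyGetD iv 0 0 ≥ PySem.List.pyGetD st j 0 ∧
               PySem.List.pyGetD iv 1 0 ≤ PySem.List.pyGetD fin j 0 then x + 1 else x) (0 : Int)) := by
  intro m
  induction m with
  | zero => intro _; simp
  | succ m ih =>
    intro hm
    have hm' : m < ivs.length := by omega
    rw [List.range_succ, List.foldl_append, ih (by omega)]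
    set pre := (ivs.take m).map (fun iv => (PySem.List.pyRange 0 N 1).foldl
          (fun x j =>
            if PySem.List.pyGetD iv 0 0 ≥ PySem.List.pyGetD st j 0 ∧
               PySem.List.pyGetD iv 1 0 ≤ PySem.List.pyGetD fin j 0 then x + 1 else x) (0 : Int)) with hpre
    have hlen : (pre.length : Int) = (m : Int) := by
      simp [hpre, List.length_take, Nat.min_eq_left (le_of_lt hm')]
    have hiv : PySem.List.pyGetD ivs (m : Int) [] = ivs[m] := by
      rw [PySem.List.pyGetD_natCast]
      simp [List.getD_eq_getElem?_getD, List.getElem?_eq_getElem hm']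
    simp only [List.foldl_cons]
    rw [List.take_succ, List.getElem?_eq_getElem hm']
    simp only [Option.toList_some, List.map_append, List.map_cons, List.map_nil, ← hpre]
    rw [hiv, show ((m : Int)) = (pre.length : Int) from hlen.symm]
    simp only [List.foldl_nil]
    exact foldl_setLast _ _ pre 0

theorem numsA_full (st fin : List Int) (hlen : st.length ≤ fin.length) :
    (PySem.List.pyRange 0 ((pvIvs st fin).length : Int) 1).foldl (fun ns i =>
      (PySem.List.pyRange 0 (st.length : Int) 1).foldl (fun ns2 j =>
        if PySem.List.pyGetD (PySem.List.pyGetD (pvIvs st fin) i []) 0 0 ≥ PySem.List.pyGetD st j 0 ∧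
           PySem.List.pyGetD (PySem.List.pyGetD (pvIvs st fin) i []) 1 0 ≤ PySem.List.pyGetD fin j 0 then
          PySem.List.pySetD ns2 i (PySem.List.pyGetD ns2 i 0 + 1)
        else ns2) (ns ++ [0])) []
    = pvNums st fin := by
  rw [foldl_pyRange_zero_toNat, Int.toNat_natCast]
  rw [numsA_eq st fin (pvIvs st fin) (st.length : Int) (pvIvs st fin).length le_rfl]
  rw [List.take_length]
  unfold pvIvs pvNums
  rw [List.map_map]
  apply List.map_congr_left
  intro p hp
  exact cnt_eq st fin hlen p hp

theorem foldl_zip_swap {α : Type} (mu : Int) :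
    ∀ (xs : List Int) (ys : List α) (acc : List α),
    (xs.zip ys).foldl (fun acc p => if p.1 = mu then acc ++ [p.2] else acc) acc
      = (ys.zip xs).foldl (fun acc p => if p.2 = mu then acc ++ [p.1] else acc) acc := by
  intro xs
  induction xs with
  | nil => intro ys acc; simp
  | cons x xs ih =>
    intro ys acc
    cases ys with
    | nil => simp
    | cons y ys => simp only [List.zip_cons_cons, List.foldl_cons]; exact ih ys _

theorem modeA_eq (nums : List Int) (ivs : List (List Int)) (mu : Int) (h : nums.length = ivs.length) :
    (PySem.List.pyRange 0 (ivs.length : Int) 1).foldl (fun acc i =>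
      if PySem.List.pyGetD nums i 0 = mu then acc ++ [PySem.List.pyGetD ivs i []] else acc) []
    = (ivs.zip nums).foldl (fun acc p => if p.2 = mu then acc ++ [p.1] else acc) [] := by
  rw [foldl_pyRange_zero_toNat, Int.toNat_natCast]
  have hfun : (fun (acc : List (List Int)) (k : Nat) =>
      if PySem.List.pyGetD nums (k : Int) 0 = mu then acc ++ [PySem.List.pyGetD ivs (k : Int) []] else acc)
      = (fun acc k => (fun (a : List (List Int)) (x : Int) (y : List Int) => if x = mu then a ++ [y] else a)
          acc (nums.getD k 0) (ivs.getD k [])) := by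
    funext acc k
    simp only [PySem.List.pyGetD_natCast]
  rw [hfun, foldl_range_two (fun (a : List (List Int)) (x : Int) (y : List Int) => if x = mu then a ++ [y] else a)
        0 [] ivs.length nums ivs [] (by omega) le_rfl]
  rw [List.take_of_length_le (by simp [List.length_zip])]
  exact foldl_zip_swap mu nums ivs []

-- ===== B-side: raw association-list sums and the sweep invariant =====

def pvSumLe (l : List (Int × Int)) (a : Int) : Int :=
  ((l.filter (fun q => decide (q.1 ≤ a))).map Prod.snd).sum
def pvLook (l : List (Int × Int)) (k : Int) : Int :=
  ((l.find? (fun p => p.1 == k)).map Prod.snd).getD 0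

theorem getD_eq_look (d : PySem.Dict Int Int) (k : Int) : d.getD k 0 = pvLook d.items k := rfl

theorem pvSumLe_append (l1 l2 : List (Int × Int)) (a : Int) :
    pvSumLe (l1 ++ l2) a = pvSumLe l1 a + pvSumLe l2 a := by
  simp [pvSumLe]

theorem pvSumLe_replace (k v a : Int) :
    ∀ (l : List (Int × Int)), (l.map Prod.fst).Nodup → k ∈ l.map Prod.fst →
    pvSumLe (l.map (fun p => if (p.1 == k) = true then (k, v) else p)) a
      = pvSumLe l a + (if k ≤ a then v - pvLook l k else 0) := by
  intro l
  induction l with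
  | nil => simp
  | cons q t ih =>
    intro hnd hk
    simp only [List.map_cons, List.nodup_cons] at hnd hk
    by_cases hq : q.1 = k
    · have hfix : t.map (fun p => if (p.1 == k) = true then (k, v) else p) = t := by
        conv_rhs => rw [← List.map_id t]
        apply List.map_congr_left
        intro p hp
        have hne : p.1 ≠ k := fun hc => hnd.1 (hq ▸ hc ▸ List.mem_map_of_mem hp)
        simp [hne]
      have hlook : pvLook (q :: t) k = q.2 := by
        unfold pvLook
        rw [List.find?_cons_of_pos (by simp [hq])]
        rfl
      simp only [List.map_cons, if_pos (by simp [hq] : (q.1 == k) = true), hfix, hlook]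
      unfold pvSumLe
      by_cases hka : k ≤ a
      · rw [List.filter_cons_of_pos (by simp [hka]),
            List.filter_cons_of_pos (by simp [hq, hka]), if_pos hka]
        simp only [List.map_cons, List.sum_cons]
        ring
      · rw [List.filter_cons_of_neg (by simp [hka]),
            List.filter_cons_of_neg (by simp [hq, hka]), if_neg hka]
        simp
    · rcases List.mem_cons.mp hk with hk | hk
      · exact absurd hk.symm hq
      · have hlook : pvLook (q :: t) k = pvLook t k := by
          unfold pvLook
          rw [List.find?_cons_of_neg (by simp [hq])]
        simp only [List.map_cons, if_neg (by simp [hq] : ¬ (q.1 == k) = true), hlook]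
        unfold pvSumLe
        by_cases hqa : q.1 ≤ a
        · rw [List.filter_cons_of_pos (by simp [hqa]), List.filter_cons_of_pos (by simp [hqa])]
          simp only [List.map_cons, List.sum_cons]
          have h2 := ih hnd.2 hk
          unfold pvSumLe at h2
          rw [h2]; ring
        · rw [List.filter_cons_of_neg (by simp [hqa]), List.filter_cons_of_neg (by simp [hqa])]
          exact ih hnd.2 hk

theorem sumLe_insert (d : PySem.Dict Int Int) (k v a : Int) (hnd : d.keys.Nodup) :
    pvSumLe (d.insert k v).items a = pvSumLe d.items a + (if k ≤ a then v - d.getD k 0 else 0) := by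
  by_cases hc : d.contains k = true
  · have hkmem : k ∈ d.items.map Prod.fst := by
      have := (PySem.Dict.contains_iff_mem_keys d k).mp hc
      simpa [PySem.Dict.keys] using this
    rw [PySem.Dict.items_insert_of_contains d v hc]
    rw [pvSumLe_replace k v a d.items (by simpa [PySem.Dict.keys] using hnd) hkmem]
    rfl
  · have hc' : d.contains k = false := by simpa using hc
    rw [PySem.Dict.items_insert_of_not_contains d v hc']
    rw [pvSumLe_append]
    rw [PySem.Dict.getD_of_not_contains d 0 hc']
    unfold pvSumLe
    by_cases hka : k ≤ a <;> simp [hka]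

theorem sumLe_erase (k a : Int) :
    ∀ (l : List (Int × Int)), (l.map Prod.fst).Nodup →
    pvSumLe (l.filter (fun p => !(p.1 == k))) a
      = pvSumLe l a - (if k ≤ a then pvLook l k else 0) := by
  intro l
  induction l with
  | nil => simp [pvSumLe, pvLook]
  | cons q t ih =>
    intro hnd
    simp only [List.map_cons, List.nodup_cons] at hnd
    by_cases hq : q.1 = k
    · have hfix : t.filter (fun p => !(p.1 == k)) = t := by
        apply List.filter_eq_self.mpr
        intro p hp
        have hne : p.1 ≠ k := fun hc => hnd.1 (hq ▸ hc ▸ List.mem_map_of_mem hp)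
        simp [hne]
      have hlook : pvLook (q :: t) k = q.2 := by
        unfold pvLook
        rw [List.find?_cons_of_pos (by simp [hq])]
        rfl
      rw [List.filter_cons_of_neg (by simp [hq]), hfix, hlook]
      unfold pvSumLe
      by_cases hka : k ≤ a
      · rw [List.filter_cons_of_pos (by simp [hq, hka]), if_pos hka]
        simp only [List.map_cons, List.sum_cons]
        ring
      · rw [List.filter_cons_of_neg (by simp [hq, hka]), if_neg hka]
        ring
    · have hlook : pvLook (q :: t) k = pvLook t k := by
        unfold pvLook
        rw [List.find?_cons_of_neg (by simp [hq])]
      rw [List.filter_cons_of_pos (by simp [hq]), hlook]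
      unfold pvSumLe
      by_cases hqa : q.1 ≤ a
      · rw [List.filter_cons_of_pos (by simp [hqa]), List.filter_cons_of_pos (by simp [hqa])]
        simp only [List.map_cons, List.sum_cons]
        have h2 := ih hnd.2
        unfold pvSumLe at h2
        rw [h2]; ring
      · rw [List.filter_cons_of_neg (by simp [hqa]), List.filter_cons_of_neg (by simp [hqa])]
        exact ih hnd.2

theorem keys_erase_eq (d : PySem.Dict Int Int) (k : Int) :
    (d.erase k).keys = d.keys.filter (fun x => !(x == k)) := by
  show (d.items.filter (fun p => !(p.1 == k))).map Prod.fst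
      = (d.items.map Prod.fst).filter (fun x => !(x == k))
  induction d.items with
  | nil => rfl
  | cons q t ih =>
    by_cases hq : q.1 = k <;> simp [hq, ih]

theorem sumLe_single (a : Int) :
    ∀ (l : List (Int × Int)), (l.map Prod.fst).Nodup →
    (∀ q ∈ l, q.1 ≤ a → q.1 = a) →
    pvSumLe l a = pvLook l a := by
  intro l
  induction l with
  | nil => simp [pvSumLe, pvLook]
  | cons q t ih =>
    intro hnd hall
    simp only [List.map_cons, List.nodup_cons] at hnd
    by_cases hqa : q.1 ≤ a
    · have hq : q.1 = a := hall q (by simp) hqa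
      have hrest : pvSumLe t a = 0 := by
        unfold pvSumLe
        rw [List.filter_eq_nil_iff.mpr]
        · rfl
        · intro p hp
          simp only [decide_eq_true_eq]
          intro hpa
          have hpe : p.1 = a := hall p (by simp [hp]) hpa
          exact hnd.1 (hq ▸ hpe ▸ List.mem_map_of_mem hp)
      have hlook : pvLook (q :: t) a = q.2 := by
        unfold pvLook
        rw [List.find?_cons_of_pos (by simp [hq])]
        rfl
      have hsum : pvSumLe (q :: t) a = q.2 + pvSumLe t a := by
        unfold pvSumLe
        rw [List.filter_cons_of_pos (by simp [hqa])]
        simp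
      rw [hsum, hrest, hlook]; ring
    · have hq : q.1 ≠ a := fun hc => hqa (le_of_eq hc)
      have hlook : pvLook (q :: t) a = pvLook t a := by
        unfold pvLook
        rw [List.find?_cons_of_neg (by simp [hq])]
      have hsum : pvSumLe (q :: t) a = pvSumLe t a := by
        unfold pvSumLe
        rw [List.filter_cons_of_neg (by simp [hqa])]
      rw [hsum, hlook]
      exact ih hnd.2 (fun p hp => hall p (by simp [hp]))

theorem nodup_keys_dstep (d : PySem.Dict Int Int) (sf : Int × Int) (hnd : d.keys.Nodup) :
    (pvDStep d sf).keys.Nodup := by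
  unfold pvDStep
  split_ifs
  · exact PySem.Dict.nodup_keys_insert _ _ _ (PySem.Dict.nodup_keys_insert _ _ _ hnd)
  · exact hnd

theorem nodup_keys_build (l : List (Int × Int)) :
    ∀ (d : PySem.Dict Int Int), d.keys.Nodup → (l.foldl pvDStep d).keys.Nodup := by
  induction l with
  | nil => intro d h; exact h
  | cons sf t ih => intro d h; exact ih _ (nodup_keys_dstep d sf h)

theorem keys_build_sub (l : List (Int × Int)) :
    ∀ (d : PySem.Dict Int Int) (k : Int), k ∈ (l.foldl pvDStep d).keys →
      k ∈ d.keys ∨ (∃ sf ∈ l, k = sf.1 ∨ k = sf.2) := by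
  induction l with
  | nil => intro d k h; exact Or.inl h
  | cons sf t ih =>
    intro d k h
    rcases ih (pvDStep d sf) k h with h' | h'
    · unfold pvDStep at h'
      split_ifs at h'
      · rcases (PySem.Dict.mem_keys_insert _ _ _ _).mp h' with h2 | h2
        · exact Or.inr ⟨sf, by simp, Or.inr h2⟩
        · rcases (PySem.Dict.mem_keys_insert _ _ _ _).mp h2 with h3 | h3
          · exact Or.inr ⟨sf, by simp, Or.inl h3⟩
          · exact Or.inl h3
      · exact Or.inl h'
    · obtain ⟨sf', hsf', hk⟩ := h'
      exact Or.inr ⟨sf', by simp [hsf'], hk⟩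

theorem sumLe_build (a : Int) :
    ∀ (l : List (Int × Int)) (d : PySem.Dict Int Int), d.keys.Nodup →
    pvSumLe (l.foldl pvDStep d).items a
      = pvSumLe d.items a + (l.map (fun sf => if sf.1 ≤ a ∧ a < sf.2 then (1 : Int) else 0)).sum := by
  intro l
  induction l with
  | nil => intro d _; simp
  | cons sf t ih =>
    intro d hnd
    simp only [List.foldl_cons, List.map_cons, List.sum_cons]
    rw [ih (pvDStep d sf) (nodup_keys_dstep d sf hnd)]
    have hstep : pvSumLe (pvDStep d sf).items a
        = pvSumLe d.items a + (if sf.1 ≤ a ∧ a < sf.2 then (1 : Int) else 0) := by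
      unfold pvDStep
      by_cases hlt : sf.1 < sf.2
      · simp only [if_pos hlt]
        rw [sumLe_insert _ _ _ _ (PySem.Dict.nodup_keys_insert _ _ _ hnd)]
        rw [sumLe_insert _ _ _ _ hnd]
        split_ifs <;> omega
      · simp only [if_neg hlt]
        have : ¬ (sf.1 ≤ a ∧ a < sf.2) := by omega
        simp [this]
    rw [hstep]; ring

-- the sweep-line invariant: over the remaining (sorted) suffix l, cover plus the pending
-- event weights ≤ x reproduces the coverage count pvCnt at every x ∈ l
theorem sweep (st fin : List Int) :
    ∀ (l : List Int) (d : PySem.Dict Int Int) (ivs : List (List Int)) (nums : List Int) (cover : Int),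
    d.keys.Nodup → l.Pairwise (· ≤ ·) →
    (∀ x ∈ l, cover + pvSumLe d.items x = pvCnt st fin x) →
    (∀ k ∈ d.keys, k ∈ l ∨ (∀ x ∈ l, x ≤ k)) →
    ((l.zip l.tail).foldl pvBStep (d, ivs, nums, cover)).2.1
        = ivs ++ ((l.zip l.tail).filter (fun p => decide (p.1 ≠ p.2))).map (fun p => [p.1, p.2])
    ∧ ((l.zip l.tail).foldl pvBStep (d, ivs, nums, cover)).2.2.1
        = nums ++ ((l.zip l.tail).filter (fun p => decide (p.1 ≠ p.2))).map (fun p => pvCnt st fin p.1) := by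
  intro l
  induction l with
  | nil => intro d ivs nums cover _ _ _ _; simp
  | cons a t ih =>
    intro d ivs nums cover hnd hsort hA hB
    cases t with
    | nil => simp
    | cons b r =>
      have hzip : ((a :: b :: r).zip (a :: b :: r).tail) = (a, b) :: ((b :: r).zip (b :: r).tail) := by
        simp
      -- the head step
      have hsortc := List.pairwise_cons.mp hsort
      have hknd : (d.items.map Prod.fst).Nodup := by simpa [PySem.Dict.keys] using hnd
      have hcover : d.getD a 0 = pvSumLe d.items a := by
        rw [getD_eq_look]
        refine (sumLe_single a d.items hknd ?_).symm
        intro q hq hqa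
        have hqk : q.1 ∈ d.keys := by
          show q.1 ∈ d.items.map (fun x => x.1)
          exact List.mem_map_of_mem hq
        rcases hB q.1 hqk with h | h
        · rcases List.mem_cons.mp h with h | h
          · exact h
          · exact le_antisymm hqa (hsortc.1 q.1 h)
        · exact le_antisymm hqa (h a (by simp))
      have hcval : cover + d.getD a 0 = pvCnt st fin a := by
        rw [hcover]; exact hA a (by simp)
      -- invariants for the suffix
      have hnd' : (d.erase a).keys.Nodup := by
        rw [keys_erase_eq]; exact hnd.filter _
      have hsort' : (b :: r).Pairwise (· ≤ ·) := hsortc.2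
      have hA' : ∀ x ∈ b :: r, (cover + d.getD a 0) + pvSumLe (d.erase a).items x = pvCnt st fin x := by
        intro x hx
        have hax : a ≤ x := hsortc.1 x hx
        have herase : pvSumLe (d.erase a).items x
            = pvSumLe d.items x - (if a ≤ x then pvLook d.items a else 0) := by
          exact sumLe_erase a x d.items hknd
        rw [herase, if_pos hax, ← getD_eq_look, ← hA x (by simp [hx])]
        ring
      have hB' : ∀ k ∈ (d.erase a).keys, k ∈ b :: r ∨ (∀ x ∈ b :: r, x ≤ k) := by
        intro k hk
        rw [keys_erase_eq] at hk
        have hk2 := List.mem_filter.mp hk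
        have hka : k ≠ a := by simpa using hk2.2
        rcases hB k hk2.1 with h | h
        · rcases List.mem_cons.mp h with h | h
          · exact absurd h hka
          · exact Or.inl h
        · exact Or.inr (fun x hx => h x (by simp [hx]))
      have := ih (d.erase a)
        (if a ≠ b then ivs ++ [[a, b]] else ivs)
        (if a ≠ b then nums ++ [cover + d.getD a 0] else nums)
        (cover + d.getD a 0) hnd' hsort' hA' hB'
      rw [hzip]
      simp only [List.foldl_cons]
      by_cases hab : a = b
      · have hstep : pvBStep (d, ivs, nums, cover) (a, b)
            = (d.erase a, ivs, nums, cover + d.getD a 0) := by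
          unfold pvBStep; simp [hab]
        rw [hstep]
        simp only [if_neg (by simp [hab] : ¬ a ≠ b)] at this
        rw [List.filter_cons_of_neg (by simp [hab])]
        exact this
      · have hstep : pvBStep (d, ivs, nums, cover) (a, b)
            = (d.erase a, ivs ++ [[a, b]], nums ++ [cover + d.getD a 0], cover + d.getD a 0) := by
          unfold pvBStep; simp [hab]
        rw [hstep]
        simp only [if_pos (by simp [hab] : a ≠ b)] at this
        rw [List.filter_cons_of_pos (by simp [hab])]
        simp only [List.map_cons]
        rw [this.1, this.2, hcval]
        constructor <;> simp

theorem stepB_eq (st fin : List Int) :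
    (((pvPts st fin).zip ((pvPts st fin).tail)).foldl pvBStep
        ((st.zip fin).foldl pvDStep PySem.Dict.empty, [], [], 0)).2.1 = pvIvs st fin
    ∧ (((pvPts st fin).zip ((pvPts st fin).tail)).foldl pvBStep
        ((st.zip fin).foldl pvDStep PySem.Dict.empty, [], [], 0)).2.2.1 = pvNums st fin := by
  have hndE : (PySem.Dict.empty : PySem.Dict Int Int).keys.Nodup := by
    simp [PySem.Dict.keys, PySem.Dict.empty]
  have hnd0 : ((st.zip fin).foldl pvDStep PySem.Dict.empty).keys.Nodup :=
    nodup_keys_build _ _ hndE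
  have hpairAll : (pvAll st fin).Pairwise (· ≤ ·) := by
    simpa [pvAll] using PySem.List.sorted_pairwise (st ++ fin) (fun x : Int => x)
  have hsort : (pvPts st fin).Pairwise (· ≤ ·) :=
    hpairAll.sublist (List.take_sublist _ _)
  have hA : ∀ x ∈ pvPts st fin,
      (0 : Int) + pvSumLe ((st.zip fin).foldl pvDStep PySem.Dict.empty).items x = pvCnt st fin x := by
    intro x _
    rw [sumLe_build x _ _ hndE]
    rw [pvCnt_eq_sum]
    simp [pvSumLe, PySem.Dict.empty]
  have hB : ∀ k ∈ ((st.zip fin).foldl pvDStep PySem.Dict.empty).keys,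
      k ∈ pvPts st fin ∨ (∀ x ∈ pvPts st fin, x ≤ k) := by
    intro k hk
    rcases keys_build_sub _ _ k hk with h | h
    · simp [PySem.Dict.keys, PySem.Dict.empty] at h
    · obtain ⟨sf, hsf, hkv⟩ := h
      have hkin : k ∈ st ++ fin := by
        rcases hkv with h | h
        · exact List.mem_append.mpr (Or.inl (h ▸ (List.of_mem_zip hsf).1))
        · exact List.mem_append.mpr (Or.inr (h ▸ (List.of_mem_zip hsf).2))
      have hkall : k ∈ pvAll st fin :=
        ((PySem.List.sorted_perm (st ++ fin) (fun x : Int => x) false).mem_iff).mpr hkin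
      rw [show pvAll st fin = pvPts st fin ++ (pvAll st fin).drop (2 * st.length) from
            (List.take_append_drop _ _).symm] at hkall
      rcases List.mem_append.mp hkall with h | h
      · exact Or.inl h
      · right
        intro x hx
        have hpa : pvAll st fin = pvPts st fin ++ (pvAll st fin).drop (2 * st.length) :=
          (List.take_append_drop _ _).symm
        have := (List.pairwise_append.mp (hpa ▸ hpairAll)).2.2
        exact this x hx k h
  have := sweep st fin (pvPts st fin) _ [] [] 0 hnd0 hsort hA hB
  simpa [pvSegs, pvIvs, pvNums] using this

-- ===== VERDICT (by name: the statement is the Claim_ definition above) =====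
theorem mode_mu_spec : Claim_equal_mode_mu := by
  intro st fin _ hpre
  obtain ⟨hle, hany⟩ := hpre
  have hN : 1 ≤ st.length := by
    by_contra h
    have hz : st.length = 0 := by omega
    simp [hz] at hany
  show mode_mu st fin = mode_mu_alt st fin
  simp only [mode_mu, mode_mu_alt]
  rw [show PySem.List.sorted (st ++ fin) (fun x => x) false = pvAll st fin from rfl]
  have hslice : PySem.List.slice (pvAll st fin) none (some (2 * (st.length : Int))) = pvPts st fin := by
    have : (2 * (st.length : Int)) = ((2 * st.length : Nat) : Int) := by push_cast; ring
    rw [this, PySem.List.slice_to_natCast]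
    rfl
  rw [hslice, PySem.List.slice_from_one]
  rw [ivA_eq st fin hN hle]
  rw [numsA_full st fin hle]
  obtain ⟨h1, h2⟩ := stepB_eq st fin
  rw [h1, h2]
  rw [modeA_eq (pvNums st fin) (pvIvs st fin)
        ((PySem.List.max? (pvNums st fin) (fun x => x)).getD 0) (by simp [pvNums, pvIvs])]
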